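-- pv_equiv track=rewrite | github.com/JVieir4/Universidade | Código/Python/1.Introdução/apelidos.py | apelidos
-- ===== SOURCE A (Python) =====
-- def apelidos(nomes):
--     d = {}
--     for p in nomes:
--         n = -1
--         for i in p.split():
--             n +=1
--         d[p] = n
--
--     abcsort =(list(d.keys()))
--     abcsort.sort()
--     ans = (sorted(abcsort, key = lambda p:d[p]))
--     return ans
-- ===== SOURCE B (Python) =====
-- def apelidos(nomes):
--     buckets = {}
--     for p in dict.fromkeys(nomes):
--         c = len(p.split()) - 1
--         buckets.setdefault(c, []).append(p)
--     ans = []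
--     for c in sorted(buckets):
--         ans.extend(sorted(buckets[c]))
--     return ans
-- ===== Notes on version B (the rewrite author's own statement) =====
-- stated objective: alternative
-- what changed: Replaces the dict-of-counts + alphabetical-sort + stable-resort pipeline by a count-indexed bucket table built in one pass over the deduplicated names, then a group-wise alphabetical sort of each bucket emitted in ascending count order.
import Mathlib
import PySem

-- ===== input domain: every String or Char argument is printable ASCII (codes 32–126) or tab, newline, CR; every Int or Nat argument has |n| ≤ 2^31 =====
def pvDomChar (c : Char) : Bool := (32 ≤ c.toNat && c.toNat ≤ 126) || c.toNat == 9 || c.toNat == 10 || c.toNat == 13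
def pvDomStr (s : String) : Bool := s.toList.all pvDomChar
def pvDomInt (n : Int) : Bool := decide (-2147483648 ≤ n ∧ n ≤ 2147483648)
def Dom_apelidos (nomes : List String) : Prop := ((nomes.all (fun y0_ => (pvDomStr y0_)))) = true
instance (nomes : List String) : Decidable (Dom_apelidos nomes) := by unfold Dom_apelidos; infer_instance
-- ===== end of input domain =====

-- B replaces A's alphabetical-sort-then-stable-resort with a count-indexed bucket
-- table over the deduplicated names, sorted bucket-wise (objective: alternative).

-- ===== PORT A =====
def apelidos (nomes : List String) : List String :=
  let d : PySem.Dict String Int :=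
    nomes.foldl
      (fun d p => d.insert p ((PySem.Str.split₀ p).foldl (fun n _ => n + 1) (-1 : Int)))
      PySem.Dict.empty
  let abcsort := PySem.List.sorted d.keys (fun x => x) false
  -- d[p]: every p sorted here is a key of d, so getD's default 0 is never read
  PySem.List.sorted abcsort (fun p => d.getD p 0) false

-- ===== PORT B =====
def apelidos_alt (nomes : List String) : List String :=
  let buckets : PySem.Dict Int (List String) :=
    (PySem.List.dedup nomes).foldl
      (fun b p => b.modify (((PySem.Str.split₀ p).length : Int) - 1) [] (fun l => l ++ [p]))
      PySem.Dict.empty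
  -- buckets[c]: every c iterated here is a key of buckets, so getD's default [] is never read
  (PySem.List.sorted buckets.keys (fun x => x) false).foldl
    (fun ans c => ans ++ PySem.List.sorted (buckets.getD c []) (fun x => x) false) []

-- ===== PRECONDITION & SPEC =====
def Spec_apelidos (nomes : List String) (out : List String) : Prop := out = apelidos_alt nomes
instance (nomes : List String) (out : List String) : Decidable (Spec_apelidos nomes out) := by unfold Spec_apelidos; infer_instance

-- ===== CLAIM (what is proved, stated in full; the proofs are below) =====
def Claim_equal_apelidos : Prop := ∀ (nomes : List String), Dom_apelidos nomes → Spec_apelidos nomes (apelidos nomes)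

-- ===== LEMMAS AND PROOFS =====

-- word count used as sort key by both programs: len(p.split()) - 1
def pvWc (p : String) : Int := ((PySem.Str.split₀ p).length : Int) - 1

-- the common output order: by word count, ties broken alphabetically
def pvRel (a b : String) : Prop := pvWc a < pvWc b ∨ (pvWc a = pvWc b ∧ a ≤ b)

lemma pvWc_fold (p : String) :
    (PySem.Str.split₀ p).foldl (fun n _ => n + 1) (-1 : Int) = pvWc p := by
  rw [show (fun (n : Int) (_ : String) => n + 1) = (fun (n : Int) x => n + (fun _ => (1 : Int)) x) from rfl,
      PySem.List.foldl_add]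
  simp [pvWc]
  omega

lemma pvRel_antisymm (a b : String) (h1 : pvRel a b) (h2 : pvRel b a) : a = b := by
  rcases h1 with h1 | ⟨e1, l1⟩ <;> rcases h2 with h2 | ⟨e2, l2⟩
  · exact absurd h2 (by omega)
  · exact absurd h1 (by omega)
  · exact absurd h2 (by omega)
  · exact le_antisymm l1 l2

-- value of the dict A builds
lemma getD_foldl_insert_fun {κ ν : Type} [BEq κ] [LawfulBEq κ] [DecidableEq κ]
    (g : κ → ν) (d0 : ν) :
    ∀ (l : List κ) (d : PySem.Dict κ ν) (v : κ),
      (l.foldl (fun d x => d.insert x (g x)) d).getD v d0 =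
        if v ∈ l then g v else d.getD v d0 := by
  intro l
  induction l with
  | nil => intro d v; simp
  | cons x xs ih =>
    intro d v
    simp only [List.foldl_cons, ih, PySem.Dict.getD_insert, List.mem_cons]
    by_cases hv : v ∈ xs <;> by_cases he : v = x <;> simp [hv, he]

-- ----- stability of PySem's insertion sort -----
lemma insertBy_pairwise {α κ : Type} [LinearOrder κ] (key : α → κ) (T : α → α → Prop)
    (x : α) : ∀ (acc : List α),
    acc.Pairwise (fun a b => key a ≤ key b) → acc.Pairwise T →
    (∀ y ∈ acc, key y ≤ key x → T y x) → (∀ y ∈ acc, key x < key y → T x y) →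
    (PySem.List.insertBy (fun a b => decide (key a < key b)) x acc).Pairwise
        (fun a b => key a ≤ key b) ∧
    (PySem.List.insertBy (fun a b => decide (key a < key b)) x acc).Pairwise T := by
  intro acc
  induction acc with
  | nil => intro _ _ _ _; simp [PySem.List.insertBy]
  | cons y ys ih =>
    intro hs hT h1 h2
    by_cases hxy : key x < key y
    · constructor
      · simp only [PySem.List.insertBy, hxy, decide_true]
        refine List.Pairwise.cons ?_ hs
        intro z hz
        rcases List.mem_cons.mp hz with rfl | hz
        · exact le_of_lt hxy
        · exact le_of_lt (lt_of_lt_of_le hxy (List.rel_of_pairwise_cons hs hz))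
      · simp only [PySem.List.insertBy, hxy, decide_true]
        refine List.Pairwise.cons ?_ hT
        intro z hz
        rcases List.mem_cons.mp hz with rfl | hz
        · exact h2 _ (List.mem_cons_self) hxy
        · exact h2 z (List.mem_cons_of_mem _ hz)
            (lt_of_lt_of_le hxy (List.rel_of_pairwise_cons hs hz))
    · have hyx : key y ≤ key x := le_of_not_gt hxy
      have ih' := ih hs.of_cons hT.of_cons
        (fun z hz hzx => h1 z (List.mem_cons_of_mem _ hz) hzx)
        (fun z hz hxz => h2 z (List.mem_cons_of_mem _ hz) hxz)
      constructor
      · simp only [PySem.List.insertBy, hxy, decide_false]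
        refine List.Pairwise.cons ?_ ih'.1
        intro z hz
        rcases (PySem.List.mem_insertBy _ _ _ _).mp hz with rfl | hz
        · exact hyx
        · exact List.rel_of_pairwise_cons hs hz
      · simp only [PySem.List.insertBy, hxy, decide_false]
        refine List.Pairwise.cons ?_ ih'.2
        intro z hz
        rcases (PySem.List.mem_insertBy _ _ _ _).mp hz with rfl | hz
        · exact h1 _ (List.mem_cons_self) hyx
        · exact List.rel_of_pairwise_cons hT hz

lemma foldl_insertBy_stable {α κ : Type} [LinearOrder κ] (key : α → κ) (S : α → α → Prop) :
    ∀ (xs acc : List α),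
    acc.Pairwise (fun a b => key a ≤ key b) →
    acc.Pairwise (fun a b => key a < key b ∨ (key a = key b ∧ S a b)) →
    (∀ y ∈ acc, ∀ x ∈ xs, S y x) → xs.Pairwise S →
    (xs.foldl (fun acc x => PySem.List.insertBy (fun a b => decide (key a < key b)) x acc)
        acc).Pairwise (fun a b => key a < key b ∨ (key a = key b ∧ S a b)) := by
  intro xs
  induction xs with
  | nil => intro acc _ hT _ _; simpa using hT
  | cons x xs ih =>
    intro acc hs hT hSx hP
    simp only [List.foldl_cons]
    have hins := insertBy_pairwise key
      (fun a b => key a < key b ∨ (key a = key b ∧ S a b)) x acc hs hT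
      (fun y hy hle => by
        rcases lt_or_eq_of_le hle with h | h
        · exact Or.inl h
        · exact Or.inr ⟨h, hSx y hy x List.mem_cons_self⟩)
      (fun y _ hlt => Or.inl hlt)
    refine ih _ hins.1 hins.2 ?_ hP.of_cons
    intro y hy z hz
    rcases (PySem.List.mem_insertBy _ _ _ _).mp hy with rfl | hy
    · exact List.rel_of_pairwise_cons hP hz
    · exact hSx y hy z (List.mem_cons_of_mem _ hz)

lemma sorted_stable {α κ : Type} [LinearOrder κ] (key : α → κ) (S : α → α → Prop)
    (xs : List α) (h : xs.Pairwise S) :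
    (PySem.List.sorted xs key false).Pairwise
      (fun a b => key a < key b ∨ (key a = key b ∧ S a b)) := by
  rw [PySem.List.sorted_eq_foldl_insertBy]
  exact foldl_insertBy_stable key S xs [] (by simp) (by simp) (by simp) h

-- ----- regrouping a list by key values -----
lemma flatMap_filter_perm {α κ : Type} [BEq κ] [LawfulBEq κ] (f : α → κ) :
    ∀ (cs : List κ) (xs : List α), cs.Nodup → (∀ x ∈ xs, f x ∈ cs) →
    (cs.flatMap (fun c => xs.filter (fun x => f x == c))).Perm xs := by
  intro cs
  induction cs with
  | nil =>
    intro xs _ hall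
    cases xs with
    | nil => simp
    | cons x xs => exact absurd (hall x List.mem_cons_self) (by simp)
  | cons c cs ih =>
    intro xs hnd hall
    simp only [List.flatMap_cons]
    have hc : c ∉ cs := by simpa using (List.nodup_cons.mp hnd).1
    have htail :
        cs.flatMap (fun c' => xs.filter (fun x => f x == c')) =
        cs.flatMap (fun c' => (xs.filter (fun x => !(f x == c))).filter
          (fun x => f x == c')) := by
      refine (List.flatMap_congr ?_).symm
      intro c' hc'
      rw [List.filter_filter]
      refine List.filter_congr ?_
      intro x _
      by_cases h : f x = c'
      · have hne : (c' = c) = False := eq_false (fun hh => hc (hh ▸ hc'))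
        simp [h, hne]
      · simp [h]
    rw [htail]
    have ihp := ih (xs.filter (fun x => !(f x == c))) (List.nodup_cons.mp hnd).2
      (fun x hx => by
        rcases List.mem_filter.mp hx with ⟨hx1, hx2⟩
        have := hall x hx1
        simp only [List.mem_cons] at this
        rcases this with h | h
        · exact absurd h (by simpa using hx2)
        · exact h)
    exact ((List.Perm.refl _).append ihp).trans
      (List.filter_append_perm (fun x => f x == c) xs)

-- ----- facts about A's result -----
lemma apelidos_perm (nomes : List String) :
    (apelidos nomes).Perm (PySem.Set.ofList nomes) := by
  unfold apelidos
  simp only []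
  refine (PySem.List.sorted_perm _ _ _).trans ?_
  refine (PySem.List.sorted_perm _ _ _).trans ?_
  rw [PySem.Dict.keys_foldl_insert]
  simp [PySem.Dict.keys_empty]
  rfl

lemma apelidos_dict_getD (nomes : List String) (v : String) (hv : v ∈ nomes) :
    (nomes.foldl
      (fun d p => d.insert p ((PySem.Str.split₀ p).foldl (fun n _ => n + 1) (-1 : Int)))
      (PySem.Dict.empty : PySem.Dict String Int)).getD v 0 = pvWc v := by
  rw [getD_foldl_insert_fun (fun p => (PySem.Str.split₀ p).foldl (fun n _ => n + 1) (-1 : Int)) 0]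
  simp [hv, pvWc_fold]

lemma apelidos_pairwise (nomes : List String) :
    (apelidos nomes).Pairwise pvRel := by
  unfold apelidos
  simp only []
  set d := nomes.foldl
      (fun d p => d.insert p ((PySem.Str.split₀ p).foldl (fun n _ => n + 1) (-1 : Int)))
      (PySem.Dict.empty : PySem.Dict String Int) with hd
  set abcsort := PySem.List.sorted d.keys (fun x => x) false with habc
  have hmem : ∀ y ∈ abcsort, y ∈ nomes := by
    intro y hy
    rw [habc, PySem.List.mem_sorted] at hy
    rw [hd, PySem.Dict.keys_foldl_insert] at hy
    simp only [PySem.Dict.keys_empty] at hy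
    exact (PySem.Set.mem_ofList nomes y).mp hy
  have hsorted : abcsort.Pairwise (fun a b : String => a ≤ b) := by
    have := PySem.List.sorted_pairwise d.keys (fun x : String => x)
    exact this.imp (fun h => h)
  have hst := sorted_stable (fun p => d.getD p 0) (fun a b : String => a ≤ b) abcsort hsorted
  refine hst.imp_of_mem ?_
  intro a b ha hb h
  have ha' := hmem a ((PySem.List.mem_sorted _ _ _ _).mp ha)
  have hb' := hmem b ((PySem.List.mem_sorted _ _ _ _).mp hb)
  have hga : d.getD a 0 = pvWc a := by rw [hd]; exact apelidos_dict_getD nomes a ha'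
  have hgb : d.getD b 0 = pvWc b := by rw [hd]; exact apelidos_dict_getD nomes b hb'
  simp only [hga, hgb] at h
  exact h

-- ----- facts about B's result -----
lemma apelidos_alt_buckets_getD (nomes : List String) (c : Int) :
    ((PySem.List.dedup nomes).foldl
      (fun b p => b.modify (((PySem.Str.split₀ p).length : Int) - 1) [] (fun l => l ++ [p]))
      (PySem.Dict.empty : PySem.Dict Int (List String))).getD c [] =
    (PySem.List.dedup nomes).filter (fun p => pvWc p == c) := by
  rw [show ((PySem.List.dedup nomes).foldl
      (fun b p => b.modify (((PySem.Str.split₀ p).length : Int) - 1) [] (fun l => l ++ [p]))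
      (PySem.Dict.empty : PySem.Dict Int (List String))) =
      (((PySem.List.dedup nomes).map (fun p => (pvWc p, p))).foldl
        (fun b q => b.modify q.1 [] (fun l => l ++ [q.2]))
        (PySem.Dict.empty : PySem.Dict Int (List String))) from by
    rw [List.foldl_map]; rfl]
  rw [PySem.Dict.getD_foldl_modify_append]
  simp [List.filter_map, Function.comp_def]

lemma apelidos_alt_eq_flatMap (nomes : List String) :
    apelidos_alt nomes =
      (PySem.List.sorted (PySem.Set.ofList ((PySem.List.dedup nomes).map pvWc))
          (fun x => x) false).flatMap
        (fun c => PySem.List.sorted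
          ((PySem.List.dedup nomes).filter (fun p => pvWc p == c)) (fun x => x) false) := by
  unfold apelidos_alt
  simp only []
  rw [PySem.List.foldl_append_eq_flatMap]
  rw [PySem.Dict.keys_foldl_modify_key (key := fun p => ((PySem.Str.split₀ p).length : Int) - 1)]
  simp only [PySem.Dict.keys_empty, List.nil_append]
  rw [show PySem.Set.update ([] : PySem.Set Int)
        ((PySem.List.dedup nomes).map (fun p => ((PySem.Str.split₀ p).length : Int) - 1)) =
      PySem.Set.ofList ((PySem.List.dedup nomes).map pvWc) from rfl]
  exact List.flatMap_congr (fun c _ => by rw [apelidos_alt_buckets_getD])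

lemma apelidos_alt_perm (nomes : List String) :
    (apelidos_alt nomes).Perm (PySem.Set.ofList nomes) := by
  rw [apelidos_alt_eq_flatMap]
  refine ((List.Perm.flatMap (List.Perm.refl _)
    (fun c _ => PySem.List.sorted_perm _ _ _)).trans ?_)
  refine (List.Perm.flatMap (PySem.List.sorted_perm _ _ _)
    (fun c _ => List.Perm.refl _)).trans ?_
  have := flatMap_filter_perm pvWc (PySem.Set.ofList ((PySem.List.dedup nomes).map pvWc))
    (PySem.List.dedup nomes)
    (PySem.Set.nodup_ofList _)
    (fun x hx => (PySem.Set.mem_ofList _ _).mpr (List.mem_map_of_mem hx))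
  exact this

lemma apelidos_alt_pairwise (nomes : List String) :
    (apelidos_alt nomes).Pairwise pvRel := by
  rw [apelidos_alt_eq_flatMap]
  rw [List.pairwise_flatMap]
  constructor
  · intro c _
    have hp := PySem.List.sorted_pairwise
      ((PySem.List.dedup nomes).filter (fun p => pvWc p == c)) (fun x : String => x)
    refine hp.imp_of_mem ?_
    intro a b ha hb hab
    have ha' := (List.mem_filter.mp ((PySem.List.mem_sorted _ _ _ _).mp ha)).2
    have hb' := (List.mem_filter.mp ((PySem.List.mem_sorted _ _ _ _).mp hb)).2
    exact Or.inr ⟨by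
      have h1 : pvWc a = c := by simpa using ha'
      have h2 : pvWc b = c := by simpa using hb'
      rw [h1, h2], hab⟩
  · have hlt := PySem.List.sorted_ofList_pairwise_lt
      ((PySem.List.dedup nomes).map pvWc)
    refine hlt.imp_of_mem ?_
    intro c1 c2 _ _ h x hx y hy
    have hx' := (List.mem_filter.mp ((PySem.List.mem_sorted _ _ _ _).mp hx)).2
    have hy' := (List.mem_filter.mp ((PySem.List.mem_sorted _ _ _ _).mp hy)).2
    have h1 : pvWc x = c1 := by simpa using hx'
    have h2 : pvWc y = c2 := by simpa using hy'
    exact Or.inl (by rw [h1, h2]; exact h)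

-- ===== VERDICT (by name: the statement is the Claim_ definition above) =====
theorem apelidos_spec : Claim_equal_apelidos := by
  intro nomes _
  unfold Spec_apelidos
  exact List.Perm.eq_of_pairwise
    (fun a b _ _ h1 h2 => pvRel_antisymm a b h1 h2)
    (apelidos_pairwise nomes)
    (apelidos_alt_pairwise nomes)
    ((apelidos_perm nomes).trans (apelidos_alt_perm nomes).symm)
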